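-- pv_equiv track=rewrite | github.com/hojoungjang/programming-exercises | 2024-kakao-winter-internship/도넛과_막대_그래프.py | get_vertice_and_edge_counts
-- ===== SOURCE A (Python) =====
-- def get_vertice_and_edge_counts(adj_list, node: int, visited: set):
--     visited.add(node)
--     v_count = 1
--     e_count = 0
--
--     if node not in adj_list:
--         return v_count, e_count
--
--     for next_node in adj_list[node]:
--         e_count += 1
--         if next_node in visited:
--             continue
--         sub_counts = get_vertice_and_edge_counts(adj_list, next_node, visited)
--         v_count += sub_counts[0]
--         e_count += sub_counts[1]
--     return v_count, e_count
-- ===== SOURCE B (Python) =====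
-- def get_vertice_and_edge_counts(adj_list, node: int, visited: set):
--     visited.add(node)
--     v_count, e_count = 1, 0
--     stack = [iter(adj_list.get(node, ()))]
--     while stack:
--         nxt = next(stack[-1], None)
--         if nxt is None:
--             stack.pop()
--             continue
--         e_count += 1
--         if nxt not in visited:
--             visited.add(nxt)
--             v_count += 1
--             stack.append(iter(adj_list.get(nxt, ())))
--     return v_count, e_count
-- ===== Notes on version B (the rewrite author's own statement) =====
-- stated objective: alternative
-- what changed: The recursive DFS is replaced by an iterative while-loop over an explicit stack of neighbour iterators (visiting nodes in the same order, without recursion), so the counting recursion becomes a single loop with two accumulators.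
import Mathlib
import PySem

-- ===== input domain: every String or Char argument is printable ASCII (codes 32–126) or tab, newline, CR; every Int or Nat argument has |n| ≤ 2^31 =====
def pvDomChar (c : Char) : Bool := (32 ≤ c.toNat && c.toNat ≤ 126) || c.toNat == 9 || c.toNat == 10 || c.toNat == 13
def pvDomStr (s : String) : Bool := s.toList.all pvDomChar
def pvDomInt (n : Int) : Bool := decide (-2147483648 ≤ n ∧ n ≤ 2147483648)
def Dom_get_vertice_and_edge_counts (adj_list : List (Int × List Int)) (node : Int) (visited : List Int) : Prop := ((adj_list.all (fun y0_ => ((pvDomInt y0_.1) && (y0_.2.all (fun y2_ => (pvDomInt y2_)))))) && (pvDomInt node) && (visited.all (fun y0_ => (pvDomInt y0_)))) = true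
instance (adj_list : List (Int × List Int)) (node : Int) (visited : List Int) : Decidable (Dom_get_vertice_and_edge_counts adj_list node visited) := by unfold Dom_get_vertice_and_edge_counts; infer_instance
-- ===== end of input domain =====

-- B replaces A's recursive DFS by an iterative while-loop over an explicit stack of neighbour
-- iterators, visiting the same nodes in the same order (equivalence is about the RETURN value;
-- in Python both mutate `visited` identically).


-- ===== PORT A =====
-- All the values stored in the adjacency dict, flattened: the pool of nodes a traversal can add.
def pvFlat (adj : List (Int × List Int)) : List Int := adj.flatMap Prod.snd

-- adj_list.get(x, []) / adj_list[x] after a membership check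
def pvNbrs (adj : List (Int × List Int)) (x : Int) : List Int :=
  ((PySem.Dict.mk adj).get? x).getD []

-- how many pool elements (plus pending-list elements) are still unvisited
def pvCard (adj : List (Int × List Int)) (extra : List Int) (vis : List Int) : Nat :=
  ((extra ++ pvFlat adj).toFinset.filter (fun x => x ∉ vis)).card

-- Fuel bounds for the two loops (both recursions strictly decrease these measures, proved below);
-- the ports run on fuel strictly larger than the measure, so the fuel guard is never reached.
def pvMeasD (adj : List (Int × List Int)) (vis : List Int) : Nat :=
  pvCard adj [] vis * ((pvFlat adj).length + 2) + ((pvFlat adj).length + 1)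

def pvMeasB (adj : List (Int × List Int)) (stack : List (List Int)) (vis : List Int) : Nat :=
  pvCard adj stack.flatten vis * ((pvFlat adj).length + 2) +
    ((stack.map List.length).sum + stack.length)

-- A's for-loop: ns = remaining neighbours, (v, e) = v_count/e_count accumulators, vis = visited;
-- dfs is the recursive call (supplied by pvDfsAF at one fuel less)
def pvGoAF (dfs : Int → List Int → (Int × Int) × List Int) :
    List Int → Int → Int → List Int → (Int × Int) × List Int
  | [], v, e, vis => ((v, e), vis)
  | n :: rest, v, e, vis =>
    if n ∈ vis then
      pvGoAF dfs rest v (e + 1) vis                       -- e_count += 1; continue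
    else
      let r := dfs n vis                                  -- sub_counts = dfs(adj, next_node, visited)
      pvGoAF dfs rest (v + r.1.1) (e + 1 + r.1.2) r.2

-- literal port of A's recursive dfs, structural on a fuel guard (never exhausted: see pvDfsAF_eq)
def pvDfsAF : Nat → List (Int × List Int) → Int → List Int → (Int × Int) × List Int
  | 0, _, _, vis => ((1, 0), vis)                          -- fuel guard; unreachable
  | fuel + 1, adj, node, vis =>
    let vis1 := PySem.Set.add vis node                     -- visited.add(node)
    match (PySem.Dict.mk adj).get? node with
    | none => ((1, 0), vis1)                               -- if node not in adj_list: return 1, 0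
    | some ns => pvGoAF (fun n w => pvDfsAF fuel adj n w) ns 1 0 vis1

def get_vertice_and_edge_counts (adj_list : List (Int × List Int)) (node : Int) (visited : List Int) : Int × Int :=
  (pvDfsAF (pvMeasD adj_list (PySem.Set.add visited node) + 1) adj_list node visited).1

-- ===== PORT B =====
-- B's while-loop: stack of neighbour iterators (an iterator = its remaining elements),
-- structural on a fuel guard that strictly exceeds the loop's step measure (see pvRunBF_eq)
def pvRunBF : Nat → List (Int × List Int) → List (List Int) → Int → Int → List Int → Int × Int
  | 0, _, _, v, e, _ => (v, e)                             -- fuel guard; unreachable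
  | fuel + 1, adj, stack, v, e, vis =>
    match stack with
    | [] => (v, e)                                         -- while stack: … done → return
    | [] :: S => pvRunBF fuel adj S v e vis                -- next(…) is None: stack.pop()
    | (n :: rest) :: S =>
      if n ∈ vis then
        pvRunBF fuel adj (rest :: S) v (e + 1) vis         -- e_count += 1 only
      else                                                 -- mark, count, push its iterator
        pvRunBF fuel adj (pvNbrs adj n :: rest :: S) (v + 1) (e + 1) (PySem.Set.add vis n)

def get_vertice_and_edge_counts_alt (adj_list : List (Int × List Int)) (node : Int) (visited : List Int) : Int × Int :=
  -- visited.add(node); v, e = 1, 0; stack = [iter(adj_list.get(node, ()))]; loop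
  pvRunBF (pvMeasB adj_list [pvNbrs adj_list node] (PySem.Set.add visited node) + 1) adj_list
    [pvNbrs adj_list node] 1 0 (PySem.Set.add visited node)

-- ===== PRECONDITION & SPEC =====
def Spec_get_vertice_and_edge_counts (adj_list : List (Int × List Int)) (node : Int) (visited : List Int) (out : Int × Int) : Prop := out = get_vertice_and_edge_counts_alt adj_list node visited
instance (adj_list : List (Int × List Int)) (node : Int) (visited : List Int) (out : Int × Int) : Decidable (Spec_get_vertice_and_edge_counts adj_list node visited out) := by unfold Spec_get_vertice_and_edge_counts; infer_instance

-- ===== CLAIM (what is proved, stated in full; the proofs are below) =====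
def Claim_equal_get_vertice_and_edge_counts : Prop := ∀ (adj_list : List (Int × List Int)) (node : Int) (visited : List Int), Dom_get_vertice_and_edge_counts adj_list node visited → Spec_get_vertice_and_edge_counts adj_list node visited (get_vertice_and_edge_counts adj_list node visited)

-- ===== LEMMAS AND PROOFS =====
set_option maxHeartbeats 1000000

theorem pvFlat_cons (p : Int × List Int) (rest : List (Int × List Int)) :
    pvFlat (p :: rest) = p.2 ++ pvFlat rest := by simp [pvFlat]

theorem pvGet?_mem_flat {adj : List (Int × List Int)} {k : Int} {ns : List Int}
    (h : (PySem.Dict.mk adj).get? k = some ns) : ∀ x ∈ ns, x ∈ pvFlat adj := by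
  induction adj with
  | nil => simp [PySem.Dict.get?] at h
  | cons p rest ih =>
    rw [show PySem.Dict.mk (p :: rest) = PySem.Dict.mk ((p.1, p.2) :: rest) by simp,
      PySem.Dict.get?_mk_cons] at h
    by_cases hk : p.1 == k
    · simp [hk] at h
      intro x hx
      rw [pvFlat_cons]
      exact List.mem_append_left _ (h ▸ hx)
    · simp [hk] at h
      intro x hx
      rw [pvFlat_cons]
      exact List.mem_append_right _ (ih h x hx)

theorem pvGet?_len_flat {adj : List (Int × List Int)} {k : Int} {ns : List Int}
    (h : (PySem.Dict.mk adj).get? k = some ns) : ns.length ≤ (pvFlat adj).length := by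
  induction adj with
  | nil => simp [PySem.Dict.get?] at h
  | cons p rest ih =>
    rw [show PySem.Dict.mk (p :: rest) = PySem.Dict.mk ((p.1, p.2) :: rest) by simp,
      PySem.Dict.get?_mk_cons] at h
    by_cases hk : p.1 == k
    · simp [hk] at h
      subst h
      rw [pvFlat_cons, List.length_append]
      omega
    · simp [hk] at h
      have := ih h
      rw [pvFlat_cons, List.length_append]
      omega

theorem pvNbrs_mem_flat {adj : List (Int × List Int)} {k : Int} :
    ∀ x ∈ pvNbrs adj k, x ∈ pvFlat adj := by
  unfold pvNbrs
  cases h : (PySem.Dict.mk adj).get? k with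
  | none => simp
  | some ns => simpa using pvGet?_mem_flat h

theorem pvNbrs_len_flat {adj : List (Int × List Int)} {k : Int} :
    (pvNbrs adj k).length ≤ (pvFlat adj).length := by
  unfold pvNbrs
  cases h : (PySem.Dict.mk adj).get? k with
  | none => simp
  | some ns => simpa using pvGet?_len_flat h

-- the arithmetic shape shared by all measure-decrease lemmas
theorem pvStep_le {c1 c2 a b L : Nat} (h : c1 ≤ c2) (hab : a < b) :
    c1 * (L + 2) + a < c2 * (L + 2) + b := by
  have := Nat.mul_le_mul_right (L + 2) h
  omega

theorem pvStep_lt {c1 c2 a b L : Nat} (h : c1 < c2) (ha : a ≤ L + 1 + b) :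
    c1 * (L + 2) + a < c2 * (L + 2) + b := by
  have h2 : (c1 + 1) * (L + 2) ≤ c2 * (L + 2) := Nat.mul_le_mul_right _ h
  rw [Nat.succ_mul] at h2
  omega

theorem pvCard_le {adj : List (Int × List Int)} {e1 e2 vis1 vis2 : List Int}
    (hp : ∀ x ∈ e1, x ∈ e2 ∨ x ∈ pvFlat adj) (hv : ∀ x ∈ vis1, x ∈ vis2) :
    pvCard adj e1 vis2 ≤ pvCard adj e2 vis1 := by
  apply Finset.card_le_card
  intro x hx
  simp only [Finset.mem_filter, List.mem_toFinset, List.mem_append] at hx ⊢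
  obtain ⟨hx1, hx2⟩ := hx
  refine ⟨?_, fun hxv => hx2 (hv x hxv)⟩
  rcases hx1 with h | h
  · exact hp x h
  · exact Or.inr h

theorem pvCard_lt {adj : List (Int × List Int)} {e1 e2 vis1 vis2 : List Int} {n : Int}
    (hp : ∀ x ∈ e1, x ∈ e2 ∨ x ∈ pvFlat adj) (hv : ∀ x ∈ vis1, x ∈ vis2)
    (hn : n ∈ e2 ∨ n ∈ pvFlat adj) (hn1 : n ∉ vis1) (hn2 : n ∈ vis2) :
    pvCard adj e1 vis2 < pvCard adj e2 vis1 := by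
  apply Finset.card_lt_card
  constructor
  · intro x hx
    simp only [Finset.mem_filter, List.mem_toFinset, List.mem_append] at hx ⊢
    obtain ⟨hx1, hx2⟩ := hx
    refine ⟨?_, fun hxv => hx2 (hv x hxv)⟩
    rcases hx1 with h | h
    · exact hp x h
    · exact Or.inr h
  · intro hsub
    have := hsub (by simp only [Finset.mem_filter, List.mem_toFinset, List.mem_append]
                     exact ⟨hn, hn1⟩ : n ∈ (e2 ++ pvFlat adj).toFinset.filter (fun x => x ∉ vis1))
    simp only [Finset.mem_filter, List.mem_toFinset] at this
    exact this.2 hn2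

theorem pvSet_mem_add {vis : List Int} {n x : Int} (hx : x ∈ vis) : x ∈ PySem.Set.add vis n := by
  unfold PySem.Set.add
  split
  · exact hx
  · exact List.mem_append_left _ hx

theorem pvSet_self_mem_add {vis : List Int} {n : Int} : n ∈ PySem.Set.add vis n := by
  unfold PySem.Set.add
  split
  · rename_i h
    simpa using List.contains_iff_mem.mp h
  · simp

-- measure for A's for-loop (used only by the proofs below)
def pvMeasG (adj : List (Int × List Int)) (ns vis : List Int) : Nat :=
  pvCard adj ns vis * ((pvFlat adj).length + 2) + ns.length

-- the four strict decreases of A's recursion and the three of B's loop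
theorem pvDecD_toG {adj : List (Int × List Int)} {k : Int} {ns : List Int} (vis : List Int)
    (h : (PySem.Dict.mk adj).get? k = some ns) : pvMeasG adj ns vis < pvMeasD adj vis := by
  unfold pvMeasG pvMeasD
  exact pvStep_le
    (pvCard_le (fun x hx => Or.inr (pvGet?_mem_flat h x hx)) (fun _ hx => hx))
    (by have := pvGet?_len_flat h; omega)

theorem pvDecG_skip (adj : List (Int × List Int)) (n : Int) (rest vis : List Int) :
    pvMeasG adj rest vis < pvMeasG adj (n :: rest) vis := by
  unfold pvMeasG
  exact pvStep_le
    (pvCard_le (fun x hx => Or.inl (List.mem_cons_of_mem _ hx)) (fun _ hx => hx))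
    (by simp)

theorem pvDecG_call (adj : List (Int × List Int)) (n : Int) (rest vis : List Int)
    (hm : n ∉ vis) : pvMeasD adj (PySem.Set.add vis n) < pvMeasG adj (n :: rest) vis := by
  unfold pvMeasG pvMeasD
  exact pvStep_lt
    (pvCard_lt (fun x hx => by simp at hx) (fun x hx => pvSet_mem_add hx)
      (Or.inl List.mem_cons_self) hm pvSet_self_mem_add)
    (by simp only [List.length_cons]; omega)

theorem pvDecG_cont (adj : List (Int × List Int)) (n : Int) (rest vis w : List Int)
    (hm : n ∉ vis) (hsup : ∀ x ∈ PySem.Set.add vis n, x ∈ w) :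
    pvMeasG adj rest w < pvMeasG adj (n :: rest) vis := by
  unfold pvMeasG
  exact pvStep_lt
    (pvCard_lt (fun x hx => Or.inl (List.mem_cons_of_mem _ hx))
      (fun x hx => hsup x (pvSet_mem_add hx))
      (Or.inl List.mem_cons_self) hm (hsup n pvSet_self_mem_add))
    (by simp only [List.length_cons]; omega)

theorem pvDecB_pop (adj : List (Int × List Int)) (S : List (List Int)) (vis : List Int) :
    pvMeasB adj S vis < pvMeasB adj ([] :: S) vis := by
  unfold pvMeasB
  simp only [List.flatten_cons, List.nil_append, List.map_cons, List.sum_cons,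
    List.length_cons, List.length_nil]
  omega

theorem pvDecB_skip (adj : List (Int × List Int)) (n : Int) (rest : List Int)
    (S : List (List Int)) (vis : List Int) :
    pvMeasB adj (rest :: S) vis < pvMeasB adj ((n :: rest) :: S) vis := by
  unfold pvMeasB
  have hsub : pvCard adj (rest :: S).flatten vis ≤ pvCard adj ((n :: rest) :: S).flatten vis := by
    apply pvCard_le _ (fun _ hx => hx)
    intro x hx
    apply Or.inl
    simp only [List.flatten_cons, List.mem_append, List.mem_cons] at hx ⊢
    tauto
  apply pvStep_le hsub
  simp only [List.map_cons, List.sum_cons, List.length_cons]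
  omega

theorem pvDecB_push (adj : List (Int × List Int)) (n : Int) (rest : List Int)
    (S : List (List Int)) (vis : List Int) (hm : n ∉ vis) :
    pvMeasB adj (pvNbrs adj n :: rest :: S) (PySem.Set.add vis n)
      < pvMeasB adj ((n :: rest) :: S) vis := by
  unfold pvMeasB
  have hlt : pvCard adj (pvNbrs adj n :: rest :: S).flatten (PySem.Set.add vis n)
      < pvCard adj ((n :: rest) :: S).flatten vis := by
    apply pvCard_lt (n := n)
    · intro x hx
      simp only [List.flatten_cons, List.mem_append] at hx ⊢
      rcases hx with h | h | h
      · exact Or.inr (pvNbrs_mem_flat x h)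
      · exact Or.inl (Or.inl (List.mem_cons_of_mem _ h))
      · exact Or.inl (Or.inr h)
    · exact fun x hx => pvSet_mem_add hx
    · exact Or.inl (by simp)
    · exact hm
    · exact pvSet_self_mem_add
  apply pvStep_lt hlt
  simp only [List.map_cons, List.sum_cons, List.length_cons]
  have := pvNbrs_len_flat (adj := adj) (k := n)
  omega

-- Proof-side versions of the two loops, by well-founded recursion on the measures: same
-- computation, but A's `visited.add(node)` is performed at the call sites so the measure
-- decreases at the call, and the result carries the fact that the visited set only grows.
mutual
def pvDfsA (adj : List (Int × List Int)) (node : Int) (vis : List Int) :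
    (Int × Int) × {w : List Int // ∀ x, x ∈ vis → x ∈ w} :=
  match h : (PySem.Dict.mk adj).get? node with
  | none => ((1, 0), ⟨vis, fun _ hx => hx⟩)
  | some ns => pvGoA adj ns 1 0 vis
termination_by pvMeasD adj vis
decreasing_by exact pvDecD_toG vis h

def pvGoA (adj : List (Int × List Int)) (ns : List Int) (v e : Int) (vis : List Int) :
    (Int × Int) × {w : List Int // ∀ x, x ∈ vis → x ∈ w} :=
  match ns with
  | [] => ((v, e), ⟨vis, fun _ hx => hx⟩)
  | n :: rest =>
    if hmem : n ∈ vis then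
      pvGoA adj rest v (e + 1) vis
    else
      let r := pvDfsA adj n (PySem.Set.add vis n)
      let q := pvGoA adj rest (v + r.1.1) (e + 1 + r.1.2) r.2.val
      (q.1, ⟨q.2.val, fun x hx => q.2.property x (r.2.property x (pvSet_mem_add hx))⟩)
termination_by pvMeasG adj ns vis
decreasing_by
  · exact pvDecG_skip adj n rest vis
  · exact pvDecG_call adj n rest vis hmem
  · exact pvDecG_cont adj n rest vis r.2.val hmem (fun x hx => r.2.property x hx)
end

def pvRunB (adj : List (Int × List Int)) (stack : List (List Int)) (v e : Int) (vis : List Int) :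
    Int × Int :=
  match stack with
  | [] => (v, e)
  | [] :: S => pvRunB adj S v e vis
  | (n :: rest) :: S =>
    if n ∈ vis then
      pvRunB adj (rest :: S) v (e + 1) vis
    else
      pvRunB adj (pvNbrs adj n :: rest :: S) (v + 1) (e + 1) (PySem.Set.add vis n)
termination_by pvMeasB adj stack vis
decreasing_by
  · exact pvDecB_pop adj S vis
  · exact pvDecB_skip adj n rest S vis
  · rename_i hm
    exact pvDecB_push adj n rest S vis hm

-- how pvDfsA evaluates, split on the dict lookup
theorem pvDfsA_eq_none {adj : List (Int × List Int)} {node : Int} {vis : List Int}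
    (h : (PySem.Dict.mk adj).get? node = none) :
    pvDfsA adj node vis = ((1, 0), ⟨vis, fun _ hx => hx⟩) := by
  rw [pvDfsA.eq_def]
  split
  · rfl
  · rename_i ns heq
    rw [h] at heq
    simp at heq

theorem pvDfsA_eq_some {adj : List (Int × List Int)} {node : Int} {vis ns : List Int}
    (h : (PySem.Dict.mk adj).get? node = some ns) :
    pvDfsA adj node vis = pvGoA adj ns 1 0 vis := by
  rw [pvDfsA.eq_def]
  split
  · rename_i heq
    rw [h] at heq
    simp at heq
  · rename_i ns' heq
    rw [h] at heq
    injection heq with h2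
    rw [h2]

-- B's loop only shifts its two accumulators: offsets move through unchanged.
theorem pvRunB_shift (adj : List (Int × List Int)) (stack : List (List Int)) (v e : Int)
    (vis : List Int) : ∀ x y : Int, pvRunB adj stack (v + x) (e + y) vis =
      ((pvRunB adj stack v e vis).1 + x, (pvRunB adj stack v e vis).2 + y) := by
  induction stack, v, e, vis using pvRunB.induct adj with
  | case1 v e vis => intro x y; simp [pvRunB]
  | case2 v e vis S ih =>
    intro x y
    simp only [pvRunB]
    exact ih x y
  | case3 v e vis n rest S h ih =>
    intro x y
    simp only [pvRunB, if_pos h]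
    rw [show e + y + 1 = e + 1 + y from by ring]
    exact ih x y
  | case4 v e vis n rest S h ih =>
    intro x y
    simp only [pvRunB, if_neg h]
    rw [show v + x + 1 = v + 1 + x from by ring, show e + y + 1 = e + 1 + y from by ring]
    exact ih x y

-- A's loop likewise only shifts its accumulators (and the visited set it builds is unaffected).
theorem pvGoA_shift (adj : List (Int × List Int)) (ns : List Int) (v e : Int) (vis : List Int) :
    ∀ x y : Int, (pvGoA adj ns (v + x) (e + y) vis).1 =
        ((pvGoA adj ns v e vis).1.1 + x, (pvGoA adj ns v e vis).1.2 + y) ∧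
      (pvGoA adj ns (v + x) (e + y) vis).2.val = (pvGoA adj ns v e vis).2.val := by
  induction ns, v, e, vis using pvGoA.induct adj (motive1 := fun _ _ => True) with
  | case1 node vis h => trivial
  | case2 node vis ns h ih => trivial
  | case3 v e vis => intro x y; simp [pvGoA]
  | case4 v e vis n rest h ih =>
    intro x y
    simp only [pvGoA, dif_pos h]
    rw [show e + y + 1 = e + 1 + y from by ring]
    exact ih x y
  | case5 v e vis n rest h ih1 ih2 ih3 =>
    intro x y
    simp only [pvGoA, dif_neg h]
    rw [show v + x + (pvDfsA adj n (PySem.Set.add vis n)).1.1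
          = v + (pvDfsA adj n (PySem.Set.add vis n)).1.1 + x from by ring,
        show e + y + 1 + (pvDfsA adj n (PySem.Set.add vis n)).1.2
          = e + 1 + (pvDfsA adj n (PySem.Set.add vis n)).1.2 + y from by ring]
    exact ⟨(ih3 x y).1, (ih3 x y).2⟩

-- The simulation: running B's loop with A's neighbour list ns on top of the stack is the same as
-- first running A's for-loop on ns and continuing B's loop with the rest of the stack; and the
-- frame pushed for a node behaves exactly like A's recursive call on that node.
theorem pvSimG (adj : List (Int × List Int)) (ns : List Int) (v e : Int) (vis : List Int) :
    ∀ S : List (List Int),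
      pvRunB adj (ns :: S) v e vis =
        pvRunB adj S (pvGoA adj ns v e vis).1.1 (pvGoA adj ns v e vis).1.2
          (pvGoA adj ns v e vis).2.val := by
  induction ns, v, e, vis using pvGoA.induct adj
    (motive1 := fun node vis => ∀ (S : List (List Int)) (v e : Int),
      pvRunB adj (pvNbrs adj node :: S) v e vis =
        pvRunB adj S (v + (pvDfsA adj node vis).1.1 - 1) (e + (pvDfsA adj node vis).1.2)
          (pvDfsA adj node vis).2.val) with
  | case1 node vis h =>
    rename_i S v e
    have hnb : pvNbrs adj node = [] := by unfold pvNbrs; rw [h]; rfl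
    rw [hnb, pvDfsA_eq_none h]
    simp only [pvRunB]
    rw [show v + ((1 : Int), (0 : Int)).1 - 1 = v from by ring,
      show e + ((1 : Int), (0 : Int)).2 = e from by ring]
  | case2 node vis ns h ih =>
    rename_i S v e
    have hnb : pvNbrs adj node = ns := by unfold pvNbrs; rw [h]; rfl
    rw [hnb, pvDfsA_eq_some h]
    have hL := pvRunB_shift adj (ns :: S) 1 0 vis (v - 1) e
    rw [show (1 : Int) + (v - 1) = v from by ring, show (0 : Int) + e = e from by ring] at hL
    have hR := pvRunB_shift adj S (pvGoA adj ns 1 0 vis).1.1 (pvGoA adj ns 1 0 vis).1.2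
      (pvGoA adj ns 1 0 vis).2.val (v - 1) e
    rw [show (pvGoA adj ns 1 0 vis).1.1 + (v - 1) = v + (pvGoA adj ns 1 0 vis).1.1 - 1 from by ring,
      show (pvGoA adj ns 1 0 vis).1.2 + e = e + (pvGoA adj ns 1 0 vis).1.2 from by ring] at hR
    rw [hL, ih S, hR]
  | case3 v e vis =>
    intro S
    simp [pvRunB, pvGoA]
  | case4 v e vis n rest h ih =>
    intro S
    simp only [pvRunB, if_pos h, pvGoA, dif_pos h]
    exact ih S
  | case5 v e vis n rest h r ih1 ih2 ih3 =>
    intro S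
    simp only [pvRunB, if_neg h, pvGoA, dif_neg h]
    rw [ih1 (rest :: S) (v + 1) (e + 1)]
    rw [show v + 1 + (pvDfsA adj n (PySem.Set.add vis n)).1.1 - 1
          = v + (pvDfsA adj n (PySem.Set.add vis n)).1.1 from by ring]
    exact ih3 S

-- the same simulation, stated for A's recursive dfs itself
theorem pvSimD (adj : List (Int × List Int)) (node : Int) (vis : List Int)
    (S : List (List Int)) (v e : Int) :
    pvRunB adj (pvNbrs adj node :: S) v e vis =
      pvRunB adj S (v + (pvDfsA adj node vis).1.1 - 1) (e + (pvDfsA adj node vis).1.2)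
        (pvDfsA adj node vis).2.val := by
  cases h : (PySem.Dict.mk adj).get? node with
  | none =>
    have hnb : pvNbrs adj node = [] := by unfold pvNbrs; rw [h]; rfl
    rw [hnb, pvDfsA_eq_none h]
    simp only [pvRunB]
    rw [show v + ((1 : Int), (0 : Int)).1 - 1 = v from by ring,
      show e + ((1 : Int), (0 : Int)).2 = e from by ring]
  | some ns =>
    have hnb : pvNbrs adj node = ns := by unfold pvNbrs; rw [h]; rfl
    rw [hnb, pvSimG adj ns v e vis S, pvDfsA_eq_some h]
    obtain ⟨h1, h2⟩ := pvGoA_shift adj ns 1 0 vis (v - 1) e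
    rw [show (1 : Int) + (v - 1) = v from by ring, show (0 : Int) + e = e from by ring] at h1 h2
    have h1a : (pvGoA adj ns v e vis).1.1 = (pvGoA adj ns 1 0 vis).1.1 + (v - 1) := by rw [h1]
    have h1b : (pvGoA adj ns v e vis).1.2 = (pvGoA adj ns 1 0 vis).1.2 + e := by rw [h1]
    rw [h1a, h1b, h2]
    rw [show (pvGoA adj ns 1 0 vis).1.1 + (v - 1) = v + (pvGoA adj ns 1 0 vis).1.1 - 1 from by ring,
      show (pvGoA adj ns 1 0 vis).1.2 + e = e + (pvGoA adj ns 1 0 vis).1.2 from by ring]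

-- The fuel the ports run on is never exhausted: with fuel above the measure, the fueled loops
-- equal the well-founded ones.
theorem pvRunBF_eq (adj : List (Int × List Int)) :
    ∀ (fuel : Nat) (stack : List (List Int)) (v e : Int) (vis : List Int),
      pvMeasB adj stack vis < fuel →
      pvRunBF fuel adj stack v e vis = pvRunB adj stack v e vis := by
  intro fuel
  induction fuel with
  | zero => intro stack v e vis h; omega
  | succ f ih =>
    intro stack v e vis h
    match stack with
    | [] => simp [pvRunBF, pvRunB]
    | [] :: S =>
      have hd := pvDecB_pop adj S vis
      simp only [pvRunBF, pvRunB]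
      exact ih S v e vis (by omega)
    | (n :: rest) :: S =>
      by_cases hm : n ∈ vis
      · have hd := pvDecB_skip adj n rest S vis
        simp only [pvRunBF, pvRunB, if_pos hm]
        exact ih _ _ _ _ (by omega)
      · have hd := pvDecB_push adj n rest S vis hm
        simp only [pvRunBF, pvRunB, if_neg hm]
        exact ih _ _ _ _ (by omega)

theorem pvGoAF_eq (adj : List (Int × List Int)) (f : Nat)
    (hQ : ∀ (node : Int) (w : List Int), pvMeasD adj (PySem.Set.add w node) < f →
      pvDfsAF f adj node w = ((pvDfsA adj node (PySem.Set.add w node)).1,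
        (pvDfsA adj node (PySem.Set.add w node)).2.val)) :
    ∀ (ns : List Int) (v e : Int) (vis : List Int), pvMeasG adj ns vis < f →
      pvGoAF (fun n w => pvDfsAF f adj n w) ns v e vis
        = ((pvGoA adj ns v e vis).1, (pvGoA adj ns v e vis).2.val) := by
  intro ns
  induction ns with
  | nil => intro v e vis h; simp [pvGoAF, pvGoA]
  | cons n rest ih =>
    intro v e vis h
    by_cases hm : n ∈ vis
    · have hd := pvDecG_skip adj n rest vis
      simp only [pvGoAF, pvGoA, if_pos hm, dif_pos hm]
      exact ih v (e + 1) vis (by omega)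
    · have hd1 := pvDecG_call adj n rest vis hm
      have hr := hQ n vis (by omega)
      have hd2 := pvDecG_cont adj n rest vis (pvDfsA adj n (PySem.Set.add vis n)).2.val hm
        (fun x hx => (pvDfsA adj n (PySem.Set.add vis n)).2.property x hx)
      simp only [pvGoAF, pvGoA, if_neg hm, dif_neg hm]
      rw [hr]
      exact ih _ _ _
        (show pvMeasG adj rest (pvDfsA adj n (PySem.Set.add vis n)).2.val < f by omega)

theorem pvDfsAF_eq (adj : List (Int × List Int)) :
    ∀ (fuel : Nat) (node : Int) (vis : List Int),
      pvMeasD adj (PySem.Set.add vis node) < fuel →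
      pvDfsAF fuel adj node vis = ((pvDfsA adj node (PySem.Set.add vis node)).1,
        (pvDfsA adj node (PySem.Set.add vis node)).2.val) := by
  intro fuel
  induction fuel with
  | zero => intro node vis h; omega
  | succ f ih =>
    intro node vis h
    cases hg : (PySem.Dict.mk adj).get? node with
    | none =>
      rw [pvDfsA_eq_none hg]
      simp [pvDfsAF, hg]
    | some ns =>
      rw [pvDfsA_eq_some hg]
      have hd := pvDecD_toG (PySem.Set.add vis node) hg
      simp only [pvDfsAF, hg]
      exact pvGoAF_eq adj f ih ns 1 0 (PySem.Set.add vis node) (by omega)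

-- ===== VERDICT (by name: the statement is the Claim_ definition above) =====
theorem get_vertice_and_edge_counts_spec : Claim_equal_get_vertice_and_edge_counts := by
  intro adj node vis _
  unfold Spec_get_vertice_and_edge_counts get_vertice_and_edge_counts get_vertice_and_edge_counts_alt
  rw [pvDfsAF_eq adj _ node vis (Nat.lt_succ_self _),
    pvRunBF_eq adj _ _ 1 0 _ (Nat.lt_succ_self _),
    pvSimD adj node (PySem.Set.add vis node) [] 1 0]
  simp only [pvRunB]
  rw [show (1 : Int) + (pvDfsA adj node (PySem.Set.add vis node)).1.1 - 1
        = (pvDfsA adj node (PySem.Set.add vis node)).1.1 from by ring,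
      show (0 : Int) + (pvDfsA adj node (PySem.Set.add vis node)).1.2
        = (pvDfsA adj node (PySem.Set.add vis node)).1.2 from by ring]
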